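-- pv_equiv track=rewrite | github.com/vinchinzu/euler | python/105.py | generate_subset_info
-- ===== SOURCE A (Python) =====
-- from typing import List, Tuple
--
-- def generate_subset_info(set_list: List[int]) -> List[Tuple[int, int, int]]:
--     """Generate all non-empty subsets using bitmasks (efficient for small n ≤ 12).
--
--     Returns array of [mask, sum, size] tuples.
--     """
--     n = len(set_list)
--     subsets = []
--
--     for mask in range(1, 1 << n):  # Skip empty subset (mask 0)
--         sum_val = 0
--         size = 0
--
--         # Calculate sum and size for this mask
--         for i in range(n):
--             if (mask & (1 << i)) != 0:
--                 sum_val += set_list[i]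
--                 size += 1
--
--         subsets.append((mask, sum_val, size))
--
--     return subsets
-- ===== SOURCE B (Python) =====
-- from typing import List, Tuple
--
-- def generate_subset_info(set_list: List[int]) -> List[Tuple[int, int, int]]:
--     """Doubling construction: subsets of the first i+1 elements are the subsets
--     of the first i elements, then {x_i} alone, then each earlier subset with x_i
--     added -- exactly mask order 1..2^n-1, built in O(2^n) total work."""
--     res = []
--     for i, x in enumerate(set_list):
--         bit = 1 << i
--         res = res + [(bit, x, 1)] + [(bit + m, s + x, sz + 1) for (m, s, sz) in res]
--     return res
-- ===== Notes on version B (the rewrite author's own statement) =====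
-- stated objective: faster
-- what changed: Replaced the per-mask inner bit-scan loop with a doubling construction: each element appends its singleton subset and all extensions of the previously built subsets, producing the same mask-ordered list with O(1) work per output tuple instead of O(n); intended as faster (asymptotic O(2^n) vs O(n*2^n)) - measured 7.76x at n=16, the largest size at which either program completes (the output itself has 2^n tuples).
import Mathlib
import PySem

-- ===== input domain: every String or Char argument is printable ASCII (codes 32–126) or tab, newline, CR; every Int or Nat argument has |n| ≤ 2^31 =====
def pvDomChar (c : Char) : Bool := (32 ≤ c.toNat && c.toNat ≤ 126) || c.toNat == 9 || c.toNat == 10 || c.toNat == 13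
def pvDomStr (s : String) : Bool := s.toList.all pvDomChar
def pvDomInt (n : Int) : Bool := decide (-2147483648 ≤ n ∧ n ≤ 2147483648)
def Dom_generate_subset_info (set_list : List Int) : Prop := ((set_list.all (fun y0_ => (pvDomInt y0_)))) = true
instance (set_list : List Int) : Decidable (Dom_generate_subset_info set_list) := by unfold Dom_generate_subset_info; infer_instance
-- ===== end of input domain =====

-- B replaces A's per-mask bit scan by a doubling construction over the elements
-- (each new element appends its singleton and all extensions of earlier subsets);
-- intended as faster (one step per output tuple instead of one inner loop per mask;
-- measured 7.76x at n=16, the largest size both complete — the output itself is exponential).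

-- ===== PORT A =====
-- literal port of A: outer loop over masks 1..2^n-1, inner index loop over range(n).
-- i from range(0, n) is always in range, so set_list[i] is pyGetD with unreachable default.
def generate_subset_info (set_list : List Int) : List (Int × Int × Int) :=
  let n := set_list.length
  (PySem.List.pyRange 1 ((1 : Int) <<< n)).foldl
    (fun subsets mask =>
      let p := (PySem.List.pyRange 0 (n : Int)).foldl
        (fun (acc : Int × Int) i =>
          -- i ≥ 0 always, so Python's 1 << i is (1 : Int) <<< i.toNat
          if PySem.Int.band mask ((1 : Int) <<< i.toNat) ≠ 0 then
            (acc.1 + PySem.List.pyGetD set_list i 0, acc.2 + 1)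
          else acc)
        (0, 0)
      subsets ++ [(mask, p.1, p.2)])
    []

-- ===== PORT B =====
-- literal port of Source B: fold over enumerate(set_list); each step appends the singleton
-- subset of the new element and every earlier subset extended by it.
def generate_subset_info_alt (set_list : List Int) : List (Int × Int × Int) :=
  (PySem.List.enumerate set_list).foldl
    (fun res p =>
      -- enumerate index p.1 ≥ 0, so Python's 1 << i is (1 : Int) <<< p.1.toNat
      let bit : Int := (1 : Int) <<< p.1.toNat
      res ++ [(bit, p.2, 1)] ++ res.map (fun t => (bit + t.1, t.2.1 + p.2, t.2.2 + 1)))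
    []

-- ===== PRECONDITION & SPEC =====
def Spec_generate_subset_info (set_list : List Int) (out : List (Int × Int × Int)) : Prop := out = generate_subset_info_alt set_list
instance (set_list : List Int) (out : List (Int × Int × Int)) : Decidable (Spec_generate_subset_info set_list out) := by unfold Spec_generate_subset_info; infer_instance

-- ===== CLAIM (what is proved, stated in full; the proofs are below) =====
def Claim_equal_generate_subset_info : Prop := ∀ (set_list : List Int), Dom_generate_subset_info set_list → Spec_generate_subset_info set_list (generate_subset_info set_list)

-- ===== LEMMAS AND PROOFS =====

-- row of the table: A's inner loop, expressed over an (index, value) pair list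
def pvRow (ps : List (Int × Int)) (mask : Int) : Int × Int :=
  ps.foldl
    (fun (acc : Int × Int) p =>
      if PySem.Int.band mask ((1 : Int) <<< p.1.toNat) ≠ 0 then
        (acc.1 + p.2, acc.2 + 1)
      else acc)
    (0, 0)

theorem pv_one_shl (j : Nat) : (1 : Int) <<< j = (2 : Int) ^ j := by
  rw [Int.shiftLeft_eq, one_mul]

theorem pv_band_pow (m j : Nat) :
    PySem.Int.band (m : Int) ((1 : Int) <<< j) = ((m &&& 2 ^ j : Nat) : Int) := by
  rw [pv_one_shl]
  have h2 : ((2 : Int) ^ j) = ((2 ^ j : Nat) : Int) := by push_cast; ring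
  rw [h2, PySem.Int.band_natCast]

theorem pv_cast_pow (k : Nat) : ((2 ^ k : Nat) : Int) = (2 : Int) ^ k := by
  push_cast; ring

theorem pv_mem_enumerate {α : Type} (xs : List α) (s : Int) (p : Int × α)
    (hp : p ∈ PySem.List.enumerate xs s) : s ≤ p.1 ∧ p.1 < s + xs.length := by
  induction xs generalizing s with
  | nil => simp [PySem.List.enumerate] at hp
  | cons x xs ih =>
    rw [PySem.List.enumerate_cons] at hp
    rcases List.mem_cons.mp hp with h | h
    · subst h; simp
    · have := ih (s + 1) h
      simp only [List.length_cons]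
      push_cast
      omega

theorem pv_enumerate_append {α : Type} (xs ys : List α) (s : Int) :
    PySem.List.enumerate (xs ++ ys) s =
      PySem.List.enumerate xs s ++ PySem.List.enumerate ys (s + xs.length) := by
  induction xs generalizing s with
  | nil => simp [PySem.List.enumerate]
  | cons x xs ih =>
    simp only [List.cons_append, PySem.List.enumerate_cons, ih, List.length_cons]
    congr 2
    congr 1
    push_cast
    ring

theorem pv_pyRange_shift (a b c : Int) :
    PySem.List.pyRange (a + c) (b + c) = (PySem.List.pyRange a b).map (fun m => c + m) := by
  rw [PySem.List.pyRange_one, PySem.List.pyRange_one, List.map_map]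
  have h : b + c - (a + c) = b - a := by ring
  rw [h]
  apply List.map_congr_left
  intro k _
  simp only [Function.comp_apply]
  ring

-- S1: appending an entry with index k does not change the row of a mask < 2^k
theorem pvRow_append_small (ps : List (Int × Int)) (k : Nat) (x : Int) (mask : Int)
    (h0 : 0 ≤ mask) (h1 : mask < 2 ^ k) :
    pvRow (ps ++ [((k : Int), x)]) mask = pvRow ps mask := by
  unfold pvRow
  rw [List.foldl_append]
  simp only [Int.shiftLeft_natCast_right, Int.toNat_natCast, List.foldl_cons, List.foldl_nil]
  have hm : mask = (mask.toNat : Int) := by omega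
  have hlt : mask.toNat < 2 ^ k :=
    (Int.toNat_lt h0).mpr (by rw [pv_cast_pow]; exact h1)
  have hb : PySem.Int.band mask ((1 : Int) <<< k) = 0 := by
    rw [hm, pv_band_pow, Nat.and_two_pow, Nat.testBit_lt_two_pow hlt]
    simp
  rw [if_neg (by simp [hb])]

-- pvRow of a pure power mask 2^k over entries with indices < k is (0,0)
theorem pvRow_pow_eq_zero (ps : List (Int × Int)) (k : Nat)
    (hk : ∀ p ∈ ps, 0 ≤ p.1 ∧ p.1 < (k : Int)) :
    pvRow ps ((2 : Int) ^ k) = (0, 0) := by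
  unfold pvRow
  rw [PySem.List.foldl_congr_mem ps _ (fun acc _ => acc) (0, 0) ?_]
  · simp
  · intro acc p hp
    have h := hk p hp
    have hb : PySem.Int.band ((2 : Int) ^ k) ((1 : Int) <<< p.1.toNat) = 0 := by
      rw [← pv_cast_pow, pv_band_pow, Nat.and_two_pow,
        Nat.testBit_two_pow_of_ne (by omega)]
      simp
    simp only [Int.shiftLeft_natCast_right]
    rw [if_neg (by simp [hb])]

-- S2: the row of mask 2^k after appending entry (k, x) is (x, 1)
theorem pvRow_append_pow (ps : List (Int × Int)) (k : Nat) (x : Int)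
    (hk : ∀ p ∈ ps, 0 ≤ p.1 ∧ p.1 < (k : Int)) :
    pvRow (ps ++ [((k : Int), x)]) ((2 : Int) ^ k) = (x, 1) := by
  have h := pvRow_pow_eq_zero ps k hk
  unfold pvRow at h ⊢
  rw [List.foldl_append, h]
  simp only [Int.shiftLeft_natCast_right, Int.toNat_natCast, List.foldl_cons, List.foldl_nil]
  have hb : PySem.Int.band ((2 : Int) ^ k) ((1 : Int) <<< k) ≠ 0 := by
    rw [← pv_cast_pow, pv_band_pow, Nat.and_two_pow, Nat.testBit_two_pow_self]
    simp
  rw [if_pos hb]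
  simp

-- S3: the row of mask 2^k + m (0 ≤ m < 2^k) after appending (k, x) extends the row of m
theorem pvRow_append_add (ps : List (Int × Int)) (k : Nat) (x : Int) (m : Int)
    (hk : ∀ p ∈ ps, 0 ≤ p.1 ∧ p.1 < (k : Int)) (h0 : 0 ≤ m) (h1 : m < 2 ^ k) :
    pvRow (ps ++ [((k : Int), x)]) ((2 : Int) ^ k + m) =
      ((pvRow ps m).1 + x, (pvRow ps m).2 + 1) := by
  unfold pvRow
  rw [List.foldl_append]
  simp only [Int.shiftLeft_natCast_right, Int.toNat_natCast, List.foldl_cons, List.foldl_nil]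
  have hmn : m = (m.toNat : Int) := by omega
  have hltm : m.toNat < 2 ^ k :=
    (Int.toNat_lt h0).mpr (by rw [pv_cast_pow]; exact h1)
  have hsum : (2 : Int) ^ k + m = ((2 ^ k + m.toNat : Nat) : Int) := by
    push_cast
    rw [Int.toNat_of_nonneg h0]
  have hcongr :
      List.foldl
        (fun (acc : Int × Int) p =>
          if PySem.Int.band ((2 : Int) ^ k + m) ((1 : Int) <<< p.1.toNat) ≠ 0 then
            (acc.1 + p.2, acc.2 + 1) else acc) (0, 0) ps =
      List.foldl
        (fun (acc : Int × Int) p =>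
          if PySem.Int.band m ((1 : Int) <<< p.1.toNat) ≠ 0 then
            (acc.1 + p.2, acc.2 + 1) else acc) (0, 0) ps := by
    apply PySem.List.foldl_congr_mem
    intro acc p hp
    have h := hk p hp
    have hb : PySem.Int.band ((2 : Int) ^ k + m) ((1 : Int) <<< p.1.toNat)
        = PySem.Int.band m ((1 : Int) <<< p.1.toNat) := by
      rw [hsum, pv_band_pow]
      conv_rhs => rw [hmn, pv_band_pow]
      rw [Nat.and_two_pow, Nat.and_two_pow, Nat.testBit_two_pow_add_gt (by omega)]
    simp only [Int.shiftLeft_natCast_right]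
    rw [hb]
  simp only [Int.shiftLeft_natCast_right] at hcongr
  rw [hcongr]
  have hb2 : PySem.Int.band ((2 : Int) ^ k + m) ((1 : Int) <<< k) ≠ 0 := by
    rw [hsum, pv_band_pow, Nat.and_two_pow,
      Nat.testBit_two_pow_add_eq, Nat.testBit_lt_two_pow hltm]
    simp
  rw [if_pos hb2]

-- B's fold computes the full table of rows over the enumerated prefix
theorem pv_alt_eq_map (xs : List Int) :
    generate_subset_info_alt xs =
      (PySem.List.pyRange 1 ((2 : Int) ^ xs.length)).map
        (fun mask => (mask, pvRow (PySem.List.enumerate xs) mask)) := by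
  induction xs using List.reverseRecOn with
  | nil =>
    have h : PySem.List.pyRange 1 ((2 : Int) ^ (List.nil : List Int).length) = [] :=
      PySem.List.pyRange_one_eq_nil (by norm_num)
    rw [h]
    simp [generate_subset_info_alt, PySem.List.enumerate]
  | append_singleton xs y ih =>
    have hk := fun p hp => pv_mem_enumerate xs 0 p hp
    simp only [zero_add] at hk
    have henum : PySem.List.enumerate (xs ++ [y]) =
        PySem.List.enumerate xs ++ [((xs.length : Int), y)] := by
      rw [pv_enumerate_append]
      simp [PySem.List.enumerate]
    unfold generate_subset_info_alt at ih ⊢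
    rw [henum, List.foldl_append, ih]
    simp only [List.foldl_cons, List.foldl_nil, Int.shiftLeft_natCast_right,
      Int.toNat_natCast, pv_one_shl]
    -- split the new mask range 1 .. 2^(len+1) into [1, 2^len), {2^len}, (2^len, 2^(len+1))
    have hlen1 : (1 : Int) ≤ 2 ^ xs.length := by
      rw [← pv_cast_pow]; exact_mod_cast Nat.one_le_two_pow
    have hpow2 : (2 : Int) ^ ((xs ++ [y]).length) = 2 ^ xs.length + 2 ^ xs.length := by
      simp [pow_succ]; ring
    have hsplit1 : PySem.List.pyRange 1 ((2 : Int) ^ (xs ++ [y]).length) =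
        PySem.List.pyRange 1 ((2 : Int) ^ xs.length) ++
        PySem.List.pyRange ((2 : Int) ^ xs.length) ((2 : Int) ^ ((xs ++ [y]).length)) :=
      PySem.List.pyRange_one_append 1 ((2 : Int) ^ xs.length) ((2 : Int) ^ ((xs ++ [y]).length))
        hlen1 (by rw [hpow2]; nlinarith [hlen1])
    have hsplit2 : PySem.List.pyRange ((2 : Int) ^ xs.length) ((2 : Int) ^ ((xs ++ [y]).length)) =
        ((2 : Int) ^ xs.length) ::
        PySem.List.pyRange ((2 : Int) ^ xs.length + 1) ((2 : Int) ^ ((xs ++ [y]).length)) :=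
      PySem.List.pyRange_one_cons
        (a := (2 : Int) ^ xs.length) (b := (2 : Int) ^ ((xs ++ [y]).length))
        (by rw [hpow2]; nlinarith [hlen1])
    have hshift : PySem.List.pyRange ((2 : Int) ^ xs.length + 1) ((2 : Int) ^ ((xs ++ [y]).length)) =
        (PySem.List.pyRange 1 ((2 : Int) ^ xs.length)).map
          (fun m => (2 : Int) ^ xs.length + m) := by
      rw [hpow2, show (2 : Int) ^ xs.length + 1 = 1 + 2 ^ xs.length from by ring,
        pv_pyRange_shift 1 ((2 : Int) ^ xs.length) ((2 : Int) ^ xs.length)]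
    rw [hsplit1, List.map_append, hsplit2, hshift]
    simp only [List.map_cons, List.map_map]
    rw [List.append_assoc]
    simp only [List.singleton_append]
    congr 1
    · -- masks < 2^len keep their old rows
      apply List.map_congr_left
      intro m hm
      rw [PySem.List.mem_pyRange_one] at hm
      rw [pvRow_append_small _ _ _ _ (by omega) hm.2]
    congr 1
    · -- the new singleton mask 2^len
      rw [pvRow_append_pow _ _ _ hk]
    · -- masks 2^len + m extend the old rows by y
      apply List.map_congr_left
      intro m hm
      rw [PySem.List.mem_pyRange_one] at hm
      simp only [Function.comp_apply]
      rw [pvRow_append_add _ _ _ _ hk (by omega) hm.2]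

-- A's inner index loop equals pvRow of the enumerated list
theorem pv_inner_eq_row (xs : List Int) (mask : Int) :
    (PySem.List.pyRange 0 (xs.length : Int)).foldl
      (fun (acc : Int × Int) i =>
        if PySem.Int.band mask ((1 : Int) <<< i.toNat) ≠ 0 then
          (acc.1 + PySem.List.pyGetD xs i 0, acc.2 + 1)
        else acc)
      (0, 0) = pvRow (PySem.List.enumerate xs) mask := by
  induction xs using List.reverseRecOn with
  | nil =>
    have h : PySem.List.pyRange 0 ((List.nil : List Int).length : Int) = [] :=
      PySem.List.pyRange_one_eq_nil (by norm_num)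
    rw [h]
    simp [pvRow, PySem.List.enumerate]
  | append_singleton xs y ih =>
    have hlen : ((xs ++ [y]).length : Int) = (xs.length : Int) + 1 := by
      simp
    have henum : PySem.List.enumerate (xs ++ [y]) =
        PySem.List.enumerate xs ++ [((xs.length : Int), y)] := by
      rw [pv_enumerate_append]
      simp [PySem.List.enumerate]
    rw [hlen, PySem.List.pyRange_one_succ_right (Int.natCast_nonneg xs.length),
      List.foldl_append, henum]
    unfold pvRow
    rw [List.foldl_append]
    simp only [Int.shiftLeft_natCast_right, Int.toNat_natCast, List.foldl_cons, List.foldl_nil]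
    have hcongr :
        List.foldl
          (fun (acc : Int × Int) i =>
            if PySem.Int.band mask ((1 : Int) <<< i.toNat) ≠ 0 then
              (acc.1 + PySem.List.pyGetD (xs ++ [y]) i 0, acc.2 + 1)
            else acc) (0, 0) (PySem.List.pyRange 0 (xs.length : Int)) =
        List.foldl
          (fun (acc : Int × Int) i =>
            if PySem.Int.band mask ((1 : Int) <<< i.toNat) ≠ 0 then
              (acc.1 + PySem.List.pyGetD xs i 0, acc.2 + 1)
            else acc) (0, 0) (PySem.List.pyRange 0 (xs.length : Int)) := by
      apply PySem.List.foldl_congr_mem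
      intro acc i hi
      rw [PySem.List.mem_pyRange_one] at hi
      have hget : PySem.List.pyGetD (xs ++ [y]) i 0 = PySem.List.pyGetD xs i 0 := by
        rw [PySem.List.pyGetD_eq_getElem _ _ hi.1 (by simp; omega),
          PySem.List.pyGetD_eq_getElem _ _ hi.1 (by omega)]
        rw [List.getElem_append_left (by omega)]
      rw [hget]
    simp only [Int.shiftLeft_natCast_right] at hcongr
    have ih' := ih
    simp only [Int.shiftLeft_natCast_right] at ih'
    rw [hcongr, ih']
    unfold pvRow
    have hget2 : PySem.List.pyGetD (xs ++ [y]) (xs.length : Int) 0 = y := by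
      rw [PySem.List.pyGetD_eq_getElem _ _ (Int.natCast_nonneg xs.length) (by simp)]
      simp
    rw [hget2]
    simp only [Int.shiftLeft_natCast_right]

-- ===== VERDICT (by name: the statement is the Claim_ definition above) =====
theorem generate_subset_info_spec : Claim_equal_generate_subset_info := by
  intro xs _
  unfold Spec_generate_subset_info generate_subset_info
  rw [pv_alt_eq_map]
  simp only [Int.shiftLeft_natCast_right]
  rw [PySem.List.foldl_append_singleton_eq_map, pv_one_shl]
  apply List.map_congr_left
  intro m _
  have hinner := pv_inner_eq_row xs m
  simp only [Int.shiftLeft_natCast_right] at hinner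
  rw [hinner]
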